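-- pv_equiv track=rewrite | github.com/yongsinfok/ocrAI | src/ocr_engine.py | _extract_tables_from_markdown
-- ===== SOURCE A (Python) =====
-- from typing import Optional, List, Dict, Any
--
-- def _extract_tables_from_markdown(text: str) -> List[List[List[str]]]:
--     """Extract tables from markdown text.
--
--     Args:
--         text: Markdown text with tables
--
--     Returns:
--         List of tables
--     """
--     tables = []
--     lines = text.split('\n')
--     current_table = []
--     in_table = False
--
--     for line in lines:
--         stripped = line.strip()
--         # Check for markdown table row
--         if '|' in stripped and stripped.startswith('|'):
--             if not in_table:
--                 in_table = True
--                 current_table = []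
--             # Skip separator lines
--             if not set(stripped) <= {'|', '-', ' ', ':'}:
--                 cells = [cell.strip() for cell in stripped.split('|')]
--                 cells = [c for c in cells if c]
--                 if cells:
--                     current_table.append(cells)
--         else:
--             if in_table and current_table:
--                 tables.append(current_table)
--                 current_table = []
--             in_table = False
--
--     if current_table:
--         tables.append(current_table)
--
--     return tables
-- ===== SOURCE B (Python) =====
-- _NON_TABLE = object()
--
--
-- def _tokenize(line):
--     """One line -> _NON_TABLE (not a table line), None (separator / empty row), or a cell list."""
--     s = line.strip()
--     if not s.startswith('|'):
--         return _NON_TABLE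
--     if set(s) <= {'|', '-', ' ', ':'}:
--         return None
--     cells = [c.strip() for c in s.split('|')]
--     cells = [c for c in cells if c]
--     return cells if cells else None
--
--
-- def _extract_tables_from_markdown(text):
--     # stage 1: parse every line independently into a token
--     tokens = [_tokenize(line) for line in text.split('\n')]
--     # stage 2: split the token stream on the _NON_TABLE sentinel (str.split-style)
--     chunks = []
--     chunk = []
--     for t in tokens:
--         if t is _NON_TABLE:
--             chunks.append(chunk)
--             chunk = []
--         else:
--             chunk.append(t)
--     chunks.append(chunk)
--     # stage 3: a chunk's rows are its non-None tokens; keep chunks with at least one row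
--     out = []
--     for ch in chunks:
--         rows = [r for r in ch if r is not None]
--         if rows:
--             out.append(rows)
--     return out
-- ===== Notes on version B (the rewrite author's own statement) =====
-- stated objective: alternative
-- what changed: Replaces A's single stateful scan (in_table/current_table flags with flushes at boundaries and at EOF) by three staged passes: tokenize every line independently into sentinel/separator/row, split the token stream on the sentinel str.split-style, and keep chunks containing at least one row.
import Mathlib
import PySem

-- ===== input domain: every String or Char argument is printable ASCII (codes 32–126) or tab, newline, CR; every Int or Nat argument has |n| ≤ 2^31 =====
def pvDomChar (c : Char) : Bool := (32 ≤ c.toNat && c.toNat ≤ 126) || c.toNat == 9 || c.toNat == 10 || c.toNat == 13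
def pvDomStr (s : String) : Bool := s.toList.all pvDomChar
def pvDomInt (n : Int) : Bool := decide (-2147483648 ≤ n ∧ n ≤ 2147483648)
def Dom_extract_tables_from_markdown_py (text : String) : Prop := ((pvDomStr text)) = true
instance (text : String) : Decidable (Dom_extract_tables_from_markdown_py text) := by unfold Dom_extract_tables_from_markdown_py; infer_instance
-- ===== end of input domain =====

-- B replaces A's single stateful scan (in_table/current_table flags, flush at boundaries and at EOF)
-- by three independent stages: tokenize every line on its own, split the token stream on a sentinel,
-- then keep the chunks that contain at least one row.

-- shared primitive: s.split(sep) for sep ≠ "" (exact: PySem.Chars.splitOn is Python's str.split)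
def pvSplit (s sep : String) : List String :=
  (PySem.Chars.splitOn s.toList sep.toList).map String.ofList

-- ===== PORT A =====
-- state = (tables, current_table, in_table)
def pvStepA (st : List (List (List String)) × List (List String) × Bool) (line : String) :
    List (List (List String)) × List (List String) × Bool :=
  let stripped := PySem.Str.strip line
  if PySem.Str.isIn "|" stripped && PySem.Str.startswith stripped "|" then
    let cur := if st.2.2 then st.2.1 else []   -- 'if not in_table: current_table = []'
    -- set(stripped) <= {'|','-',' ',':'}  (subset test on the set of characters)
    if (PySem.Set.ofList stripped.toList).all
        (fun c => c == '|' || c == '-' || c == ' ' || c == ':') then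
      (st.1, cur, true)
    else
      let cells := (pvSplit stripped "|").map PySem.Str.strip
      let cells := cells.filter (fun c => c != "")
      if cells ≠ [] then (st.1, cur ++ [cells], true) else (st.1, cur, true)
  else
    if st.2.2 && st.2.1 ≠ [] then (st.1 ++ [st.2.1], [], false)
    else (st.1, st.2.1, false)

def extract_tables_from_markdown_py (text : String) : List (List (List String)) :=
  let lines := pvSplit text "\n"
  let st := lines.foldl pvStepA ([], [], false)
  if st.2.1 ≠ [] then st.1 ++ [st.2.1] else st.1

-- ===== PORT B =====
-- token: none = _NON_TABLE sentinel, some none = separator/empty row, some (some cells) = a row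
def pvTokenize (line : String) : Option (Option (List String)) :=
  let s := PySem.Str.strip line
  if !(PySem.Str.startswith s "|") then none
  else if (PySem.Set.ofList s.toList).all
      (fun c => c == '|' || c == '-' || c == ' ' || c == ':') then some none
  else
    let cells := ((pvSplit s "|").map PySem.Str.strip).filter (fun c => c != "")
    if cells ≠ [] then some (some cells) else some none

-- stage-2 loop state = (chunks, chunk): split the token stream on the sentinel
def pvStepB (st : List (List (Option (List String))) × List (Option (List String)))
    (t : Option (Option (List String))) :
    List (List (Option (List String))) × List (Option (List String)) :=
  match t with
  | none => (st.1 ++ [st.2], [])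
  | some o => (st.1, st.2 ++ [o])

-- stage 3: a chunk's rows are its non-None tokens; keep it iff it has at least one row
def pvEmitChunk (ch : List (Option (List String))) : Option (List (List String)) :=
  let rows := ch.reduceOption
  if rows ≠ [] then some rows else none

def extract_tables_from_markdown_py_alt (text : String) : List (List (List String)) :=
  let tokens := (pvSplit text "\n").map pvTokenize
  let st := tokens.foldl pvStepB ([], [])
  (st.1 ++ [st.2]).filterMap pvEmitChunk

-- ===== PRECONDITION & SPEC =====
def Spec_extract_tables_from_markdown_py (text : String) (out : List (List (List String))) : Prop := out = extract_tables_from_markdown_py_alt text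
instance (text : String) (out : List (List (List String))) : Decidable (Spec_extract_tables_from_markdown_py text out) := by unfold Spec_extract_tables_from_markdown_py; infer_instance

-- ===== CLAIM (what is proved, stated in full; the proofs are below) =====
def Claim_equal_extract_tables_from_markdown_py : Prop := ∀ (text : String), Dom_extract_tables_from_markdown_py text → Spec_extract_tables_from_markdown_py text (extract_tables_from_markdown_py text)

-- ===== LEMMAS AND PROOFS =====

def pvIsTableLine (line : String) : Bool :=
  PySem.Str.startswith (PySem.Str.strip line) "|"

def pvParseRow (line : String) : Option (List String) :=
  let s := PySem.Str.strip line
  if (PySem.Set.ofList s.toList).all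
      (fun c => c == '|' || c == '-' || c == ' ' || c == ':') then
    none
  else
    let cells := ((pvSplit s "|").map PySem.Str.strip).filter (fun c => c != "")
    if cells ≠ [] then some cells else none

def pvFin (st : List (List (List String)) × List (List String) × Bool) :
    List (List (List String)) :=
  if st.2.1 ≠ [] then st.1 ++ [st.2.1] else st.1

-- A's table-line condition equals startswith alone ('|' in stripped follows from it)
lemma pv_cond_eq (l : String) :
    (PySem.Str.isIn "|" (PySem.Str.strip l) && PySem.Str.startswith (PySem.Str.strip l) "|")
      = pvIsTableLine l := by
  unfold pvIsTableLine
  cases hs : PySem.Str.startswith (PySem.Str.strip l) "|"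
  · simp
  · simp only [Bool.and_true]
    rw [PySem.Str.isIn_iff_infix]
    have := (PySem.Chars.startswith_iff ((PySem.Str.strip l)).toList ("|".toList)).mp (by simpa using hs)
    exact this.isInfix

lemma pv_tokenize_eq (l : String) :
    pvTokenize l = if pvIsTableLine l then some (pvParseRow l) else none := by
  simp only [pvTokenize, pvParseRow, pvIsTableLine]
  split_ifs <;> simp_all

lemma pv_stepA_table_false (tables : List (List (List String))) (l : String)
    (h : pvIsTableLine l = true) :
    pvStepA (tables, [], false) l = (tables, (pvParseRow l).toList, true) := by
  simp only [pvStepA, pvParseRow, pv_cond_eq, h]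
  split_ifs <;> simp_all

lemma pv_stepA_table_true (tables : List (List (List String))) (cur : List (List String))
    (l : String) (h : pvIsTableLine l = true) :
    pvStepA (tables, cur, true) l = (tables, cur ++ (pvParseRow l).toList, true) := by
  simp only [pvStepA, pvParseRow, pv_cond_eq, h]
  split_ifs <;> simp_all

lemma pv_stepA_nt_false (tables : List (List (List String))) (l : String)
    (h : pvIsTableLine l = false) :
    pvStepA (tables, [], false) l = (tables, [], false) := by
  simp only [pvStepA, pv_cond_eq, h]
  simp

lemma pv_reduceOption_map_some {α : Type} (l : List α) :
    (l.map some).reduceOption = l := by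
  induction l with
  | nil => rfl
  | cons a t ih => simp [List.reduceOption_cons_of_some, ih]

lemma pv_emit_red (chunk : List (Option (List String))) :
    pvEmitChunk (chunk.reduceOption.map some) = pvEmitChunk chunk := by
  simp [pvEmitChunk, pv_reduceOption_map_some]

lemma pv_stepA_nt_true (tables : List (List (List String))) (cur : List (List String))
    (l : String) (h : pvIsTableLine l = false) :
    pvStepA (tables, cur, true) l =
      (tables ++ (pvEmitChunk (cur.map some)).toList, [], false) := by
  simp only [pvStepA, pv_cond_eq, h, pvEmitChunk, pv_reduceOption_map_some]
  by_cases hc : cur = [] <;> simp [hc]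

lemma pv_filterMap_append_one (chunks : List (List (Option (List String))))
    (ch : List (Option (List String))) :
    (chunks ++ [ch]).filterMap pvEmitChunk
      = chunks.filterMap pvEmitChunk ++ (pvEmitChunk ch).toList := by
  cases h : pvEmitChunk ch <;> simp [List.filterMap_append, h]

def pvFinB (st : List (List (Option (List String))) × List (Option (List String))) :
    List (List (List String)) :=
  (st.1 ++ [st.2]).filterMap pvEmitChunk

lemma pv_red_singleton (o : Option (List String)) :
    ([o] : List (Option (List String))).reduceOption = o.toList := by
  cases o <;> rfl

lemma pv_red_append_one (chunk : List (Option (List String))) (o : Option (List String)) :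
    (chunk ++ [o]).reduceOption = chunk.reduceOption ++ o.toList := by
  rw [List.reduceOption_append, pv_red_singleton]

-- simulation: A's stateful fold against B's token-stream split, related state by state.
-- A-state = (chunks.filterMap pvEmitChunk, chunk.reduceOption, b), with chunk = [] whenever b = false.
lemma pv_sim : ∀ (lines : List String) (chunks : List (List (Option (List String))))
    (chunk : List (Option (List String))) (b : Bool), (b = false → chunk = []) →
    pvFin (lines.foldl pvStepA (chunks.filterMap pvEmitChunk, chunk.reduceOption, b))
      = pvFinB ((lines.map pvTokenize).foldl pvStepB (chunks, chunk)) := by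
  intro lines
  induction lines with
  | nil =>
    intro chunks chunk b _
    simp only [List.foldl_nil, List.map_nil, pvFin, pvFinB, pvEmitChunk]
    by_cases hc : chunk.reduceOption = [] <;> simp [hc]
  | cons l rest ih =>
    intro chunks chunk b hb
    rw [List.map_cons, List.foldl_cons, List.foldl_cons, pv_tokenize_eq]
    cases h : pvIsTableLine l
    · -- sentinel token: B closes the chunk; A flushes (or stays) and leaves the table
      simp only [Bool.false_eq_true, if_false, pvStepB]
      cases b
      · rw [hb rfl, List.reduceOption_nil, pv_stepA_nt_false _ _ h]
        have h0 : (chunks ++ [([] : List (Option (List String)))]).filterMap pvEmitChunk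
            = chunks.filterMap pvEmitChunk := by
          simp [pvEmitChunk]
        have := ih (chunks ++ [[]]) [] false (fun _ => rfl)
        rw [h0, List.reduceOption_nil] at this
        exact this
      · rw [pv_stepA_nt_true _ _ _ h, pv_emit_red, ← pv_filterMap_append_one]
        have := ih (chunks ++ [chunk]) [] false (fun _ => rfl)
        rw [List.reduceOption_nil] at this
        exact this
    · -- row/separator token: B appends to the chunk; A appends (or starts) the row
      simp only [if_true, pvStepB]
      cases b
      · rw [hb rfl, List.reduceOption_nil, pv_stepA_table_false _ _ h]
        have := ih chunks [pvParseRow l] true (by simp)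
        rw [pv_red_singleton] at this
        simpa using this
      · rw [pv_stepA_table_true _ _ _ h]
        have := ih chunks (chunk ++ [pvParseRow l]) true (by simp)
        rw [pv_red_append_one] at this
        exact this

-- ===== VERDICT (by name: the statement is the Claim_ definition above) =====
theorem extract_tables_from_markdown_py_spec : Claim_equal_extract_tables_from_markdown_py := by
  intro text _
  unfold Spec_extract_tables_from_markdown_py extract_tables_from_markdown_py
    extract_tables_from_markdown_py_alt
  have := pv_sim (pvSplit text "\n") [] [] false (fun _ => rfl)
  simpa [pvFin, pvFinB] using this
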